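-- pv_equiv track=rewrite | github.com/marin-jovanovic/top-down-operator-precedence | regex_manager.py | is_separator_present
-- ===== SOURCE A (Python) =====
-- def is_separator_present(s):
--     for i_0, token_0 in enumerate(s):
--
--         if token_0 == "|":
--
--             if i_0 == 0:
--                 return True
--
--             elif s[i_0 - 1] != "\\":
--                 return True
--
--     return False
-- ===== SOURCE B (Python) =====
-- def is_separator_present(s):
--     return "|" in s.replace("\\|", "")
-- ===== Notes on version B (the rewrite author's own statement) =====
-- stated objective: idiomatic
-- what changed: Replaced the indexed per-character scan with its escape back-lookup by a staged string rewrite: delete every escaped pipe with one replace call and then test plain substring membership of the pipe in the result.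
import Mathlib
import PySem

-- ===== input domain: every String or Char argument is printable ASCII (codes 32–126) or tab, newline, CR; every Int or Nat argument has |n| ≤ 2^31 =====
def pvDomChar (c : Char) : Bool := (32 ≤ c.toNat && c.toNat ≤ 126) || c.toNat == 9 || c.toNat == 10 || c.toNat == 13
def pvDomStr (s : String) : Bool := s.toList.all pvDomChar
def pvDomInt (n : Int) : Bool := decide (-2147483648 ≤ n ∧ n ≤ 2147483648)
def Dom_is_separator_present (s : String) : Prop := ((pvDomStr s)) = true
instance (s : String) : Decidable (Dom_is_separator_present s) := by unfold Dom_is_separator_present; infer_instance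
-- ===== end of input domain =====

-- B replaces A's indexed scan (with its s[i-1] escape back-lookup) by a staged rewrite: delete escaped pipes with s.replace("\\|","") and test "|" in the result; objective: idiomatic.


-- ===== PORT A =====
-- the 'for i_0, token_0 in enumerate(s)' loop with early returns
def isSepLoopA (cs : List Char) : List (Int × Char) → Bool
  | [] => false
  | (i, c) :: rest =>
    if c = '|' then
      if i = 0 then true
      else if PySem.List.pyGet? cs (i - 1) ≠ some '\\' then true
      else isSepLoopA cs rest
    else isSepLoopA cs rest

def is_separator_present (s : String) : Bool :=
  isSepLoopA s.toList (PySem.List.enumerate s.toList)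

-- ===== PORT B =====
-- return "|" in s.replace("\\|", "")
def is_separator_present_alt (s : String) : Bool :=
  PySem.Str.isIn "|" (PySem.Str.replace s "\\|" "")

-- ===== PRECONDITION & SPEC =====
def Spec_is_separator_present (s : String) (out : Bool) : Prop := out = is_separator_present_alt s
instance (s : String) (out : Bool) : Decidable (Spec_is_separator_present s out) := by unfold Spec_is_separator_present; infer_instance

-- ===== CLAIM (what is proved, stated in full; the proofs are below) =====
def Claim_equal_is_separator_present : Prop := ∀ (s : String), Dom_is_separator_present s → Spec_is_separator_present s (is_separator_present s)

-- ===== LEMMAS AND PROOFS =====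

-- proof-side model of s.replace("\\|","") on char lists (left-to-right, non-overlapping)
def myRep : List Char → List Char
  | [] => []
  | '\\' :: '|' :: t => myRep t
  | c :: t => c :: myRep t

-- proof-side model of A's scan: the Bool is "previous char was a backslash"
def gScan : Bool → List Char → Bool
  | _, [] => false
  | b, c :: t => if c = '|' ∧ b = false then true else gScan (decide (c = '\\')) t

theorem myRep_cons (c : Char) (t : List Char) (h : ¬ (c = '\\' ∧ t.head? = some '|')) :
    myRep (c :: t) = c :: myRep t := by
  by_cases hc : c = '\\'
  · subst hc
    match t with
    | [] => simp [myRep]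
    | d :: t' =>
      have hd : d ≠ '|' := by intro hd; exact h ⟨rfl, by simp [hd]⟩
      simp [myRep, hd]
  · simp [myRep, hc]

theorem myRep_go :
    ∀ (fuel : Nat) (l acc : List Char), l.length ≤ fuel →
      PySem.Chars.replace.go ['\\', '|'] [] fuel l acc = acc.reverse ++ myRep l := by
  intro fuel
  induction fuel with
  | zero =>
    intro l acc h
    have : l = [] := List.length_eq_zero_iff.mp (Nat.le_zero.mp h)
    subst this
    simp [PySem.Chars.replace.go, myRep]
  | succ n ih =>
    intro l acc h
    match l with
    | [] => simp [PySem.Chars.replace.go, myRep]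
    | c :: t =>
      rw [PySem.Chars.replace.go]
      by_cases hp : List.isPrefixOf ['\\', '|'] (c :: t)
      · rw [if_pos hp]
        obtain ⟨r, hr⟩ := List.isPrefixOf_iff_prefix.mp hp
        have hr' : '\\' = c ∧ '|' :: r = t := by simpa using hr
        obtain ⟨hc, ht⟩ := hr'
        subst hc; subst ht
        simp only [List.drop_succ_cons, List.length_cons, List.length_nil, List.drop_zero,
          List.reverse_nil, List.nil_append]
        rw [ih r acc (by simp at h; omega)]
        simp [myRep]
      · rw [if_neg hp]
        rw [ih t (c :: acc) (by simpa using Nat.le_of_succ_le_succ h)]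
        have hno : ¬ (c = '\\' ∧ t.head? = some '|') := by
          rintro ⟨rfl, hh⟩
          match t, hh with
          | d :: t', hh =>
            have : d = '|' := by simpa using hh
            subst this
            exact hp (by simp [List.isPrefixOf])
        rw [myRep_cons c t hno]
        simp

theorem replace_eq_myRep (cs : List Char) :
    PySem.Chars.replace cs ['\\', '|'] [] = myRep cs := by
  rw [PySem.Chars.replace]
  simp only [List.isEmpty, Bool.false_eq_true, if_false]
  exact myRep_go cs.length cs [] le_rfl

theorem isIn_singleton (a : Char) (l : List Char) :
    PySem.Chars.isIn [a] l = decide (a ∈ l) := by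
  by_cases h : a ∈ l
  · have hi : [a] <:+: l := by
      obtain ⟨s1, s2, rfl⟩ := List.append_of_mem h
      exact ⟨s1, s2, by simp⟩
    rw [(PySem.Chars.isIn_iff_infix _ _).mpr hi]
    simp [h]
  · have hi : ¬ [a] <:+: l := fun hi => h (hi.subset (by simp))
    rw [(PySem.Chars.isIn_eq_false_iff _ _).mpr hi]
    simp [h]

theorem gScan_eq_mem (cs : List Char) :
    gScan false cs = decide ('|' ∈ myRep cs) := by
  induction cs using myRep.induct with
  | case1 => simp [gScan, myRep]
  | case2 t ih =>
    show gScan false ('\\' :: '|' :: t) = _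
    have h1 : gScan false ('\\' :: '|' :: t) = gScan false t := by
      simp [gScan]
    rw [h1, ih]
    simp [myRep]
  | case3 c t hne ih =>
    have hno : ¬ (c = '\\' ∧ t.head? = some '|') := by
      rintro ⟨rfl, hh⟩
      match t, hh with
      | d :: t', hh =>
        have : d = '|' := by simpa using hh
        exact hne t' rfl (by rw [this])
    rw [myRep_cons c t hno]
    by_cases hc : c = '|'
    · subst hc
      simp [gScan]
    · have hstep : gScan false (c :: t) = gScan (decide (c = '\\')) t := by
        simp [gScan, hc]
      by_cases hb : c = '\\'
      · subst hb
        have ht : t.head? ≠ some '|' := fun hh => hno ⟨rfl, hh⟩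
        have htt : gScan true t = gScan false t := by
          match t with
          | [] => rfl
          | d :: t' =>
            have hd : d ≠ '|' := by intro hd; exact ht (by simp [hd])
            simp [gScan, hd]
        rw [hstep, show (decide (('\\' : Char) = '\\')) = true from by decide, htt, ih]
        simp
      · rw [hstep, show (decide (c = '\\')) = false from by simp [hb], ih]
        simp
        exact fun h => absurd h.symm hc

-- A's loop over the suffix l of the full string, previous char p, is gScan (p = '\\')
theorem loopA_eq_gScan (l : List Char) : ∀ (pre : List Char) (p : Char),
    isSepLoopA (pre ++ p :: l) (PySem.List.enumerate l ((pre.length : Int) + 1))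
      = gScan (decide (p = '\\')) l := by
  induction l with
  | nil => intro pre p; simp [PySem.List.enumerate, isSepLoopA, gScan]
  | cons c l' ih =>
    intro pre p
    have hassoc : pre ++ p :: c :: l' = (pre ++ [p]) ++ c :: l' := by simp
    have hidx : PySem.List.pyGet? (pre ++ p :: c :: l') ((pre.length : Int) + 1 - 1) = some p := by
      simpa using PySem.List.pyGet?_append_length pre p (c :: l')
    rw [PySem.List.enumerate_cons]
    show (if c = '|' then
          if ((pre.length : Int) + 1) = 0 then true
          else if PySem.List.pyGet? (pre ++ p :: c :: l') ((pre.length : Int) + 1 - 1) ≠ some '\\' then true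
          else isSepLoopA (pre ++ p :: c :: l') (PySem.List.enumerate l' ((pre.length : Int) + 1 + 1))
        else isSepLoopA (pre ++ p :: c :: l') (PySem.List.enumerate l' ((pre.length : Int) + 1 + 1)))
      = gScan (decide (p = '\\')) (c :: l')
    have htail : isSepLoopA (pre ++ p :: c :: l') (PySem.List.enumerate l' ((pre.length : Int) + 1 + 1))
        = gScan (decide (c = '\\')) l' := by
      have := ih (pre ++ [p]) c
      rw [hassoc]
      simpa [List.length_append, add_comm, add_left_comm, add_assoc] using this
    by_cases hc : c = '|'
    · subst hc
      rw [if_pos rfl, if_neg (by omega), hidx]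
      by_cases hp : p = '\\'
      · subst hp
        simp [gScan, htail]
      · simp [gScan, hp]
    · rw [if_neg hc]
      simp [gScan, hc, htail]

theorem altB_eq_mem (s : String) :
    is_separator_present_alt s = decide ('|' ∈ myRep s.toList) := by
  unfold is_separator_present_alt
  rw [show PySem.Str.isIn "|" (PySem.Str.replace s "\\|" "")
        = PySem.Chars.isIn "|".toList (PySem.Str.replace s "\\|" "").toList from by
    simp]
  rw [show (PySem.Str.replace s "\\|" "").toList
        = PySem.Chars.replace s.toList "\\|".toList "".toList from by simp]
  show PySem.Chars.isIn ['|'] (PySem.Chars.replace s.toList ['\\', '|'] []) = _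
  rw [replace_eq_myRep, isIn_singleton]

theorem isSep_eq (s : String) : is_separator_present s = is_separator_present_alt s := by
  rw [altB_eq_mem, ← gScan_eq_mem]
  unfold is_separator_present
  cases h : s.toList with
  | nil => simp [PySem.List.enumerate, isSepLoopA, gScan]
  | cons c rest =>
    rw [PySem.List.enumerate_cons]
    by_cases hc : c = '|'
    · subst hc
      simp [isSepLoopA, gScan]
    · have hA := loopA_eq_gScan rest [] c
      simp only [List.nil_append, List.length_nil, Int.natCast_zero, zero_add] at hA
      simp only [isSepLoopA, if_neg hc]
      simpa [gScan, hc] using hA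

-- ===== VERDICT (by name: the statement is the Claim_ definition above) =====
theorem is_separator_present_spec : Claim_equal_is_separator_present := by
  intro s _
  unfold Spec_is_separator_present
  exact isSep_eq s
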